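-- pv_equiv track=rewrite | github.com/IanFindlay/advent-of-code | 2015/day_08.py | encoded_literal
-- ===== SOURCE A (Python) =====
-- def encoded_literal(lines):
--     literal = 0
--     encoded = 0
--     for line in lines:
--         literal += len(line)
--
--         # Starts at 2 due to the outer " needed to be encoded
--         line_encoded = 2
--         for character in line:
--             if character in ('\\', '"'):
--                 line_encoded += 2
--             else:
--                 line_encoded += 1
--
--         encoded += line_encoded
--
--     return encoded - literal
-- ===== SOURCE B (Python) =====
-- def _encode(line):
--     """Materialize the encoded representation of a line."""
--     return '"' + ''.join('\\' + c if c in ('\\', '"') else c for c in line) + '"'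
--
--
-- def encoded_literal(lines):
--     return sum(len(_encode(line)) - len(line) for line in lines)
-- ===== Notes on version B (the rewrite author's own statement) =====
-- stated objective: alternative
-- what changed: Instead of keeping two running totals (literal and encoded lengths) and counting +1/+2 per character, B actually constructs the encoded string of each line (escaping backslashes and quotes, adding the surrounding quotes) and sums the per-line length differences; no global accumulators or final subtraction.
import Mathlib
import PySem

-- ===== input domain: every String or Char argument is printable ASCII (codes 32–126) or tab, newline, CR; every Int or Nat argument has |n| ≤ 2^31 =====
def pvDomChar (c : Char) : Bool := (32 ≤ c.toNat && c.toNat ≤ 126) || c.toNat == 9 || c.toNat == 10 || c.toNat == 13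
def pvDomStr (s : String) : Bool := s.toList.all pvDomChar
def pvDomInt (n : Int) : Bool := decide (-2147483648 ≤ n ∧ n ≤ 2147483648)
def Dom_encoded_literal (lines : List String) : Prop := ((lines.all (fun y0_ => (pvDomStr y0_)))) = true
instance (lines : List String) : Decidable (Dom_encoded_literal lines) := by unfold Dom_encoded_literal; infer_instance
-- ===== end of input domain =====

-- B builds the actual encoded string of each line and sums length differences, instead of A's two counting accumulators; same value, proved below.
-- ===== PORT A =====
def encoded_literal (lines : List String) : Int :=
  let r : Int × Int := lines.foldl (fun st line =>
    let literal := st.1 + PySem.Str.len line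
    let line_encoded := line.toList.foldl
      (fun acc character => if character = '\\' || character = '"' then acc + 2 else acc + 1)
      (2 : Int)
    (literal, st.2 + line_encoded)) (0, 0)
  r.2 - r.1

-- ===== PORT B =====
-- '\\' + c if c in ('\\', '"') else c, as a one-character-or-two piece
def pvEsc (c : Char) : List Char := if c = '\\' || c = '"' then ['\\', c] else [c]

-- '"' + ''.join(pieces) + '"' ; ''.join ported as PySem.Chars.join []
def pvEncode (line : String) : List Char :=
  '"' :: PySem.Chars.join [] (line.toList.map pvEsc) ++ ['"']

def encoded_literal_alt (lines : List String) : Int :=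
  (lines.map (fun line => ((pvEncode line).length : Int) - (PySem.Str.len line : Int))).sum

-- ===== PRECONDITION & SPEC =====
def Spec_encoded_literal (lines : List String) (out : Int) : Prop := out = encoded_literal_alt lines
instance (lines : List String) (out : Int) : Decidable (Spec_encoded_literal lines out) := by unfold Spec_encoded_literal; infer_instance

-- ===== CLAIM (what is proved, stated in full; the proofs are below) =====
def Claim_equal_encoded_literal : Prop := ∀ (lines : List String), Dom_encoded_literal lines → Spec_encoded_literal lines (encoded_literal lines)

-- ===== LEMMAS AND PROOFS =====

-- ''.join with empty separator is concatenation
theorem pvJoinNil (ps : List (List Char)) : PySem.Chars.join [] ps = ps.flatten := by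
  induction ps with
  | nil => simp [PySem.Chars.join, List.intercalate]
  | cons p ps ih =>
    cases ps with
    | nil => simp [PySem.Chars.join, List.intercalate]
    | cons q qs =>
      simp [PySem.Chars.join, List.intercalate, List.intersperse] at ih ⊢
      exact ih

-- A's inner loop computes exactly the length of B's encoded string of the same line.
theorem pvInner (cs : List Char) (a : Int) :
    cs.foldl (fun acc c => if c = '\\' || c = '"' then acc + 2 else acc + 1) a
      = a + ((PySem.Chars.join [] (cs.map pvEsc)).length : Int) := by
  rw [pvJoinNil]
  induction cs generalizing a with
  | nil => simp
  | cons c cs ih =>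
    simp only [List.foldl_cons, ih, List.map_cons, List.flatten_cons, List.length_append]
    by_cases h1 : c = '\\' <;> by_cases h2 : c = '"' <;>
      simp [h1, h2, pvEsc] <;> ring

theorem pvMain (lines : List String) (a b : Int) :
    (let r := lines.foldl (fun (st : Int × Int) line =>
        (st.1 + PySem.Str.len line,
         st.2 + line.toList.foldl
           (fun acc character => if character = '\\' || character = '"' then acc + 2 else acc + 1)
           (2 : Int))) (a, b)
     r.2 - r.1)
      = b - a +
        (lines.map (fun line => ((pvEncode line).length : Int) - (PySem.Str.len line : Int))).sum := by
  induction lines generalizing a b with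
  | nil => simp
  | cons l ls ih =>
    simp only [List.foldl_cons, List.map_cons, List.sum_cons]
    rw [ih, pvInner]
    simp [pvEncode]

    ring

-- ===== VERDICT (by name: the statement is the Claim_ definition above) =====
theorem encoded_literal_spec : Claim_equal_encoded_literal := by
  intro lines _
  unfold Spec_encoded_literal encoded_literal encoded_literal_alt
  have := pvMain lines 0 0
  simp only at this ⊢
  rw [this]
  ring
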